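-- pv_equiv track=rewrite | github.com/alifkurniawan/tesis | experiments/tmhmm3/tm_util.py | get_predicted_type_from_labels
-- ===== SOURCE A (Python) =====
-- def get_predicted_type_from_labels(labels):
--     labels = list([int(i) for i in labels])
--     if 0 in labels or 1 in labels:
--         if 2 in labels:
--             return 1
--         else:
--             return 0
--     else:
--         if 2 in labels:
--             return 2
--         else:
--             return 3
-- ===== SOURCE B (Python) =====
-- def get_predicted_type_from_labels(labels):
--     has_low = False
--     has_two = False
--     for i in labels:
--         v = int(i)
--         if v == 0 or v == 1:
--             has_low = True
--         elif v == 2: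
--             has_two = True
--     if has_low:
--         return 1 if has_two else 0
--     else:
--         return 2 if has_two else 3
-- ===== Notes on version B (the rewrite author's own statement) =====
-- stated objective: simpler
-- what changed: Replaces the four separate list-membership scans (0 in, 1 in, 2 in, twice) with a single pass maintaining two booleans has_low/has_two and a final 2x2 decision.
import Mathlib
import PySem

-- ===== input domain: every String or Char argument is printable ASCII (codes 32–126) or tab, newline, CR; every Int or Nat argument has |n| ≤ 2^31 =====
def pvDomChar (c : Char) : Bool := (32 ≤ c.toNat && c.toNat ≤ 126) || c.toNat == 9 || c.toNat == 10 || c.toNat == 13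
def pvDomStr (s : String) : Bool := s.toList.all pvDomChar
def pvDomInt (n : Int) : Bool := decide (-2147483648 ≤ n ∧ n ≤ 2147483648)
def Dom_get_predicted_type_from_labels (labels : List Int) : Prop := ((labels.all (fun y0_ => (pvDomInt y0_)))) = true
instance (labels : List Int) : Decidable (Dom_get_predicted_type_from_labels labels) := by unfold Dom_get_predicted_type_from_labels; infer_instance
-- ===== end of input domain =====

-- B replaces four membership scans with a single pass keeping two flags (simpler decomposition).

-- ===== PORT A =====
def get_predicted_type_from_labels (labels : List Int) : Int :=
  -- labels = list([int(i) for i in labels]) : identity on Int inputs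
  let labels := labels.map (fun i => i)
  if 0 ∈ labels ∨ 1 ∈ labels then
    if 2 ∈ labels then 1 else 0
  else
    if 2 ∈ labels then 2 else 3

-- ===== PORT B =====
-- one loop iteration of B: update (has_low, has_two) from the next label
def pvBStep (fl : Bool × Bool) (i : Int) : Bool × Bool :=
  let v := i
  if v == 0 || v == 1 then (true, fl.2)
  else if v == 2 then (fl.1, true)
  else fl

def get_predicted_type_from_labels_alt (labels : List Int) : Int :=
  let flags := labels.foldl pvBStep (false, false)
  if flags.1 then (if flags.2 then 1 else 0)
  else (if flags.2 then 2 else 3)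

-- ===== PRECONDITION & SPEC =====
def Spec_get_predicted_type_from_labels (labels : List Int) (out : Int) : Prop := out = get_predicted_type_from_labels_alt labels
instance (labels : List Int) (out : Int) : Decidable (Spec_get_predicted_type_from_labels labels out) := by unfold Spec_get_predicted_type_from_labels; infer_instance

-- ===== CLAIM (what is proved, stated in full; the proofs are below) =====
def Claim_equal_get_predicted_type_from_labels : Prop := ∀ (labels : List Int), Dom_get_predicted_type_from_labels labels → Spec_get_predicted_type_from_labels labels (get_predicted_type_from_labels labels)

-- ===== LEMMAS AND PROOFS =====
lemma flags_foldl (l : List Int) (a b : Bool) :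
    l.foldl pvBStep (a, b)
    = (a || decide (∃ x ∈ l, x = 0 ∨ x = 1), b || decide ((2 : Int) ∈ l)) := by
  induction l generalizing a b with
  | nil => simp
  | cons x xs ih =>
    rw [List.foldl_cons]
    by_cases h0 : x = 0
    · subst h0
      rw [show pvBStep (a, b) 0 = (true, b) from rfl, ih]
      simp [List.mem_cons]
    · by_cases h1 : x = 1
      · subst h1
        rw [show pvBStep (a, b) 1 = (true, b) from rfl, ih]
        simp [List.mem_cons]
      · by_cases h2 : x = 2
        · subst h2
          rw [show pvBStep (a, b) 2 = (a, true) from rfl, ih]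
          simp [List.mem_cons]
        · rw [show pvBStep (a, b) x = (a, b) from by simp [pvBStep, h0, h1, h2], ih]
          have hA : (∃ y ∈ x :: xs, y = 0 ∨ y = 1) ↔ (∃ y ∈ xs, y = 0 ∨ y = 1) := by
            simp only [List.mem_cons]
            constructor
            · rintro ⟨y, (rfl | hy), h⟩
              · rcases h with rfl | rfl <;> simp_all
              · exact ⟨y, hy, h⟩
            · rintro ⟨y, hy, h⟩
              exact ⟨y, Or.inr hy, h⟩
          have hB : ((2 : Int) ∈ x :: xs) ↔ (2 ∈ xs) := by
            simp only [List.mem_cons]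
            constructor
            · rintro (h | h)
              · exact absurd h.symm h2
              · exact h
            · exact Or.inr
          simp [hB, h0, h1]

-- ===== VERDICT (by name: the statement is the Claim_ definition above) =====
theorem get_predicted_type_from_labels_spec : Claim_equal_get_predicted_type_from_labels := by
  intro labels _
  unfold Spec_get_predicted_type_from_labels get_predicted_type_from_labels get_predicted_type_from_labels_alt
  simp only [List.map_id_fun', id]
  rw [flags_foldl]
  simp only [Bool.false_or]
  by_cases hl : ∃ x ∈ labels, x = 0 ∨ x = 1
  · have hl' : 0 ∈ labels ∨ 1 ∈ labels := by
      obtain ⟨x, hx, h⟩ := hl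
      rcases h with rfl | rfl
      · exact Or.inl hx
      · exact Or.inr hx
    by_cases h2 : (2 : Int) ∈ labels <;> simp [hl, hl', h2]
  · have hl' : ¬(0 ∈ labels ∨ 1 ∈ labels) := by
      rintro (h | h)
      · exact hl ⟨0, h, Or.inl rfl⟩
      · exact hl ⟨1, h, Or.inr rfl⟩
    by_cases h2 : (2 : Int) ∈ labels <;> simp [hl, hl', h2]
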